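-- pv_equiv track=rewrite | github.com/hamster111111/Grounded-Chart | src/grounded_chart/plan_feedback.py | _issue_type_for_layout_update
-- ===== SOURCE A (Python) =====
-- from typing import Any
--
-- def _issue_type_for_layout_update(update: dict[str, Any], failed_contracts: tuple[str, ...]) -> str:
--     raw = str(update.get("issue_type") or "").strip()
--     if raw:
--         return raw
--     reason = str(update.get("reason") or "").lower()
--     target = str(update.get("target") or "").lower()
--     for contract in failed_contracts:
--         normalized = str(contract).lower()
--         if "inset" in reason and "inset" in normalized:
--             return str(contract)
--         if "legend" in reason and "legend" in normalized:
--             return str(contract)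
--         if "crowd" in reason and "crowd" in normalized:
--             return str(contract)
--         if "panel" in target and "panel" in normalized:
--             return str(contract)
--     return failed_contracts[0] if failed_contracts else "layout.plan_update"
-- ===== SOURCE B (Python) =====
-- def _issue_type_for_layout_update(update, failed_contracts):
--     raw = str(update.get("issue_type") or "").strip()
--     if raw:
--         return raw
--     reason = str(update.get("reason") or "").lower()
--     target = str(update.get("target") or "").lower()
--     lowered = [str(c).lower() for c in failed_contracts]
--     # keyword-major: first matching index per active keyword, then the minimum
--     best = len(lowered)
--     for kw, src in (("inset", reason), ("legend", reason), ("crowd", reason), ("panel", target)):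
--         if kw in src:
--             best = min(best, next((i for i, nc in enumerate(lowered) if kw in nc), len(lowered)))
--     if best < len(failed_contracts):
--         return str(failed_contracts[best])
--     return failed_contracts[0] if failed_contracts else "layout.plan_update"
-- ===== Notes on version B (the rewrite author's own statement) =====
-- stated objective: alternative
-- what changed: B traverses keyword-major instead of contract-major: it computes, for each active keyword, the index of its first matching contract in a lowered copy of the list, takes the minimum of those indices, and returns the contract at that index; A scans contracts once re-testing all four keyword conditions per contract.
import Mathlib
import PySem

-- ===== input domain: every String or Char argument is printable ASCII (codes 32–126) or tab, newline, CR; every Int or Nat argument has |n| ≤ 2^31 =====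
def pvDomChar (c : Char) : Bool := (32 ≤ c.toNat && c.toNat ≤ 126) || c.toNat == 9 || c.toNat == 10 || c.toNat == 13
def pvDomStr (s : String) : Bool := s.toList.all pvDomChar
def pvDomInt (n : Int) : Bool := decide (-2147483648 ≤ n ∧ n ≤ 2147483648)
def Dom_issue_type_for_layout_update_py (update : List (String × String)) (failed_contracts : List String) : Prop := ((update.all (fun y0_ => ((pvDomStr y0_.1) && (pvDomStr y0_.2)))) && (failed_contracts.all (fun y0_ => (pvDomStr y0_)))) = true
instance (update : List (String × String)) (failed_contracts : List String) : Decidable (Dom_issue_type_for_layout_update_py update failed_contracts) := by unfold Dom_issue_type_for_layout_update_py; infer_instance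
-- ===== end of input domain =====

-- B is keyword-major: per active keyword, the index of its first matching contract; the minimum
-- index wins (a different traversal order than A's contract-major scan; same behaviour).


-- ===== PORT A =====
-- A's for-loop over failed_contracts: four source-side checks per contract, in order.
def pvALoop (reason target : String) : List String → Option String
  | [] => none
  | c :: rest =>
    let normalized := PySem.Str.lower c
    if PySem.Str.isIn "inset" reason && PySem.Str.isIn "inset" normalized then some c
    else if PySem.Str.isIn "legend" reason && PySem.Str.isIn "legend" normalized then some c
    else if PySem.Str.isIn "crowd" reason && PySem.Str.isIn "crowd" normalized then some c
    else if PySem.Str.isIn "panel" target && PySem.Str.isIn "panel" normalized then some c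
    else pvALoop reason target rest

def issue_type_for_layout_update_py (update : List (String × String)) (failed_contracts : List String) : String :=
  let raw := PySem.Str.strip (PySem.Dict.getD (PySem.Dict.mk update) "issue_type" "")
  if raw ≠ "" then raw
  else
    let reason := PySem.Str.lower (PySem.Dict.getD (PySem.Dict.mk update) "reason" "")
    let target := PySem.Str.lower (PySem.Dict.getD (PySem.Dict.mk update) "target" "")
    match pvALoop reason target failed_contracts with
    | some s => s
    | none => match failed_contracts with
              | [] => "layout.plan_update"
              | c :: _ => c

-- ===== PORT B =====
def issue_type_for_layout_update_py_alt (update : List (String × String)) (failed_contracts : List String) : String :=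
  let raw := PySem.Str.strip (PySem.Dict.getD (PySem.Dict.mk update) "issue_type" "")
  if raw ≠ "" then raw
  else
    let reason := PySem.Str.lower (PySem.Dict.getD (PySem.Dict.mk update) "reason" "")
    let target := PySem.Str.lower (PySem.Dict.getD (PySem.Dict.mk update) "target" "")
    let lowered := failed_contracts.map PySem.Str.lower
    -- keyword-major loop: first matching index per active keyword, minimum wins
    -- (List.findIdx returns lowered.length when no element matches, exactly like Python's next(..., len(lowered)))
    let best := [("inset", reason), ("legend", reason), ("crowd", reason), ("panel", target)].foldl
      (fun best (p : String × String) =>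
        if PySem.Str.isIn p.1 p.2 then
          min best (lowered.findIdx (fun nc => PySem.Str.isIn p.1 nc))
        else best) lowered.length
    if best < failed_contracts.length then failed_contracts.getD best ""
    else match failed_contracts with
         | [] => "layout.plan_update"
         | c :: _ => c

-- ===== PRECONDITION & SPEC =====
def Spec_issue_type_for_layout_update_py (update : List (String × String)) (failed_contracts : List String) (out : String) : Prop := out = issue_type_for_layout_update_py_alt update failed_contracts
instance (update : List (String × String)) (failed_contracts : List String) (out : String) : Decidable (Spec_issue_type_for_layout_update_py update failed_contracts out) := by unfold Spec_issue_type_for_layout_update_py; infer_instance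

-- ===== CLAIM (what is proved, stated in full; the proofs are below) =====
def Claim_equal_issue_type_for_layout_update_py : Prop := ∀ (update : List (String × String)) (failed_contracts : List String), Dom_issue_type_for_layout_update_py update failed_contracts → Spec_issue_type_for_layout_update_py update failed_contracts (issue_type_for_layout_update_py update failed_contracts)

-- ===== LEMMAS AND PROOFS =====
-- min of two first-match indices is the first-match index of the disjunction
theorem pvMin_findIdx {α : Type} (p q : α → Bool) (l : List α) :
    min (l.findIdx p) (l.findIdx q) = l.findIdx (fun x => p x || q x) := by
  induction l with
  | nil => simp
  | cons a l ih =>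
    cases hp : p a <;> cases hq : q a <;>
      simp [List.findIdx_cons, hp, hq]

theorem pvFindIdx_false {α : Type} (l : List α) :
    l.findIdx (fun _ => false) = l.length := by
  induction l with
  | nil => rfl
  | cons a l ih => simp [List.findIdx_cons, ih]

-- one keyword-major fold step folds its source-side test into the predicate
theorem pvStep {α : Type} (b : Bool) (p r : α → Bool) (l : List α) :
    (if b = true then min (l.findIdx p) (l.findIdx r) else l.findIdx p) =
      l.findIdx (fun x => p x || b && r x) := by
  cases b
  · simp
  · simp only [Bool.true_and]; exact pvMin_findIdx p r l

-- the whole keyword-major fold = first-match index of the full disjunction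
theorem pvBest_eq_findIdx (reason target : String) (lowered : List String) :
    ([("inset", reason), ("legend", reason), ("crowd", reason), ("panel", target)].foldl
      (fun best (p : String × String) =>
        if PySem.Str.isIn p.1 p.2 then
          min best (lowered.findIdx (fun nc => PySem.Str.isIn p.1 nc))
        else best) lowered.length) =
      lowered.findIdx (fun nc =>
        PySem.Str.isIn "inset" reason && PySem.Str.isIn "inset" nc
          || PySem.Str.isIn "legend" reason && PySem.Str.isIn "legend" nc
          || PySem.Str.isIn "crowd" reason && PySem.Str.isIn "crowd" nc
          || PySem.Str.isIn "panel" target && PySem.Str.isIn "panel" nc) := by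
  simp only [List.foldl_cons, List.foldl_nil]
  rw [show lowered.length = lowered.findIdx (fun _ => false) from (pvFindIdx_false lowered).symm,
    pvStep, pvStep, pvStep, pvStep]
  simp [Bool.or_assoc]

-- A's four-branch if-chain collapses to one disjunction
theorem pvChain_eq {α : Type} (b1 b2 b3 b4 : Bool) (v : α) (x : α) :
    (if b1 then v else if b2 then v else if b3 then v else if b4 then v else x) =
      (if (b1 || b2 || b3 || b4) then v else x) := by
  cases b1 <;> cases b2 <;> cases b3 <;> cases b4 <;> simp

-- A's loop as find? of the disjunction predicate
theorem pvALoop_eq_find? (reason target : String) (cs : List String) :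
    pvALoop reason target cs =
      cs.find? (fun c =>
        PySem.Str.isIn "inset" reason && PySem.Str.isIn "inset" (PySem.Str.lower c)
          || PySem.Str.isIn "legend" reason && PySem.Str.isIn "legend" (PySem.Str.lower c)
          || PySem.Str.isIn "crowd" reason && PySem.Str.isIn "crowd" (PySem.Str.lower c)
          || PySem.Str.isIn "panel" target && PySem.Str.isIn "panel" (PySem.Str.lower c)) := by
  induction cs with
  | nil => rfl
  | cons c rest ih =>
    unfold pvALoop
    rw [pvChain_eq, List.find?_cons]
    cases h : (PySem.Str.isIn "inset" reason && PySem.Str.isIn "inset" (PySem.Str.lower c)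
          || PySem.Str.isIn "legend" reason && PySem.Str.isIn "legend" (PySem.Str.lower c)
          || PySem.Str.isIn "crowd" reason && PySem.Str.isIn "crowd" (PySem.Str.lower c)
          || PySem.Str.isIn "panel" target && PySem.Str.isIn "panel" (PySem.Str.lower c)) <;>
      simp [ih]

-- find? with a fallback, expressed through findIdx (B's index-based shape)
theorem pvFind?_findIdx (p : String → Bool) (cs : List String) (fb : String) :
    (match cs.find? p with | some s => s | none => fb) =
      (if cs.findIdx p < cs.length then cs.getD (cs.findIdx p) "" else fb) := by
  induction cs with
  | nil => simp
  | cons a l ih =>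
    cases h : p a
    · simp only [List.find?_cons, h, List.findIdx_cons, cond_false]
      rw [ih]
      by_cases hl : l.findIdx p < l.length <;> simp [hl]
    · simp [h, List.findIdx_cons]

-- ===== VERDICT (by name: the statement is the Claim_ definition above) =====
theorem issue_type_for_layout_update_py_spec : Claim_equal_issue_type_for_layout_update_py := by
  intro update failed_contracts _
  unfold Spec_issue_type_for_layout_update_py issue_type_for_layout_update_py issue_type_for_layout_update_py_alt
  simp only [pvBest_eq_findIdx]
  simp only [pvALoop_eq_find?, List.findIdx_map, Function.comp_def, pvFind?_findIdx]
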